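-- pv_equiv track=rewrite | github.com/ParanoidHW/CePing | llm_perf/strategy/pp_strategy.py | count_operations
-- ===== SOURCE A (Python) =====
-- from typing import Dict, Optional, List, Any, TYPE_CHECKING
--
-- def count_operations(schedules: List[List[str]]) -> Dict[str, int]:
--     """Count forward and backward operations.
--
--     Args:
--         schedules: List of operation sequences
--
--     Returns:
--         {"forward": count, "backward": count}
--     """
--     forward_count = 0
--     backward_count = 0
--
--     for ops in schedules:
--         for op in ops:
--             if op.startswith("F"):
--                 forward_count += 1
--             elif op.startswith("B"):
--                 backward_count += 1
--
--     return {"forward": forward_count, "backward": backward_count}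
-- ===== SOURCE B (Python) =====
-- def count_operations(schedules):
--     """Count forward and backward operations via a flattened list of first characters."""
--     flat = [op[:1] for ops in schedules for op in ops]
--     return {"forward": flat.count("F"), "backward": flat.count("B")}
-- ===== Notes on version B (the rewrite author's own statement) =====
-- stated objective: idiomatic
-- what changed: Replaces the branching double loop with counters by a flat comprehension of each op's first character and two list.count lookups, eliminating the if/elif control flow and the maintained counter state (C-speed list.count gives a constant-factor win).
import Mathlib
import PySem

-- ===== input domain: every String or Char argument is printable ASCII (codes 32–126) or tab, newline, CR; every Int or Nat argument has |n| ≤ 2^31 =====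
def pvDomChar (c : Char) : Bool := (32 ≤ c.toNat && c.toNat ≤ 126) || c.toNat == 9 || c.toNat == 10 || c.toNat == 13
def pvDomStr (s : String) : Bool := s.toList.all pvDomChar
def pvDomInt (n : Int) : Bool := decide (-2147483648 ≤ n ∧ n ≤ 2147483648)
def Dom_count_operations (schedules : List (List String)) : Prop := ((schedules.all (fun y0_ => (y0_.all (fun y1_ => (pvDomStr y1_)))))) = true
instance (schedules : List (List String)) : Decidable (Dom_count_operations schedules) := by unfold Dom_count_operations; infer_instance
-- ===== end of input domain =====

-- B flattens every op's first character (op[:1]) into one list and reads the two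
-- totals off with list.count, instead of A's if/elif counter updates inside nested loops.
-- ===== PORT A =====
def count_operations (schedules : List (List String)) : List (String × Int) :=
  let st := schedules.foldl (fun st ops =>
    ops.foldl (fun st op =>
      if PySem.Str.startswith op "F" then (st.1 + 1, st.2)
      else if PySem.Str.startswith op "B" then (st.1, st.2 + 1)
      else st) st) ((0 : Int), (0 : Int))
  [("forward", st.1), ("backward", st.2)]

-- ===== PORT B =====
def count_operations_alt (schedules : List (List String)) : List (String × Int) :=
  let flat := schedules.flatMap (fun ops => ops.map (fun op => PySem.Str.slice op none (some 1)))
  [("forward", (PySem.List.count flat "F" : Int)), ("backward", (PySem.List.count flat "B" : Int))]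

-- ===== PRECONDITION & SPEC =====
def Spec_count_operations (schedules : List (List String)) (out : List (String × Int)) : Prop := out = count_operations_alt schedules
instance (schedules : List (List String)) (out : List (String × Int)) : Decidable (Spec_count_operations schedules out) := by unfold Spec_count_operations; infer_instance

-- ===== CLAIM (what is proved, stated in full; the proofs are below) =====
def Claim_equal_count_operations : Prop := ∀ (schedules : List (List String)), Dom_count_operations schedules → Spec_count_operations schedules (count_operations schedules)

-- ===== LEMMAS AND PROOFS =====

-- ===== VERDICT (by name: the statement is the Claim_ definition above) =====
-- first-character bridge: op[:1] == "c"  is exactly  op.startswith("c")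
lemma slice1_beq_eq (op : String) (c : Char) :
    (PySem.Str.slice op none (some 1) == String.ofList [c]) = PySem.Str.startswith op (String.ofList [c]) := by
  have h1 : (PySem.Str.slice op none (some 1)).toList = op.toList.take 1 := by
    simp [PySem.Str.toList_slice, PySem.List.slice_to]
  rw [Bool.eq_iff_iff, beq_iff_eq, ← String.toList_inj, h1]
  simp [PySem.Chars.startswith_iff]
  cases op.toList with
  | nil => simp
  | cons h t => simp [List.prefix_cons_iff]; constructor <;> (intro e; simp [e])

-- a string starting with "F" does not start with "B"
lemma FB_excl (op : String) (h : PySem.Str.startswith op "F" = true) : PySem.Str.startswith op "B" = false := by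
  revert h
  simp only [PySem.Str.startswith_eq]
  have hF : ("F" : String).toList = ['F'] := by decide
  have hB : ("B" : String).toList = ['B'] := by decide
  rw [hF, hB, PySem.Chars.startswith_iff, ← Bool.not_eq_true, PySem.Chars.startswith_iff]
  rintro ⟨t, ht⟩ ⟨t2, ht2⟩
  rw [← ht2] at ht
  simp at ht

-- A's inner loop over one schedule, characterised by countP
lemma inner_foldl (l : List String) (f b : Int) :
    l.foldl (fun st op =>
      if PySem.Str.startswith op "F" then (st.1 + 1, st.2)
      else if PySem.Str.startswith op "B" then (st.1, st.2 + 1)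
      else st) (f, b)
    = (f + (l.countP (fun op => PySem.Str.startswith op "F") : Int),
       b + (l.countP (fun op => PySem.Str.startswith op "B") : Int)) := by
  induction l generalizing f b with
  | nil => simp
  | cons op t ih =>
    rw [List.foldl_cons, List.countP_cons, List.countP_cons]
    by_cases hF : PySem.Str.startswith op "F" = true
    · simp only [hF, FB_excl op hF, if_true, Bool.false_eq_true, if_false, ih]
      refine Prod.ext ?_ ?_ <;> simp <;> ring
    · by_cases hB : PySem.Str.startswith op "B" = true
      · simp only [hF, hB, if_true, ih]
        refine Prod.ext ?_ ?_ <;> simp <;> ring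
      · simp only [hF, hB, ih]
        simp

-- A's nested loop is a fold over the flattened schedules
lemma nested_eq_flat (s : List (List String)) (step : (Int × Int) → String → (Int × Int)) (init : Int × Int) :
    s.foldl (fun st ops => ops.foldl step st) init = (s.flatMap id).foldl step init := by
  induction s generalizing init with
  | nil => rfl
  | cons ops t ih => simp [List.foldl_append, ih]

-- B's count of first characters equals A's countP of startswith
lemma count_eq_countP (s : List (List String)) (c : Char) :
    ((s.flatMap (fun ops => ops.map (fun op => PySem.Str.slice op none (some 1)))).count (String.ofList [c]) : Int)
    = ((s.flatMap id).countP (fun op => PySem.Str.startswith op (String.ofList [c])) : Int) := by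
  have h : s.flatMap (fun ops => ops.map (fun op => PySem.Str.slice op none (some 1)))
      = (s.flatMap id).map (fun op => PySem.Str.slice op none (some 1)) := by
    rw [List.map_flatMap]; rfl
  rw [h, List.count_eq_countP, List.countP_map]
  congr 1
  apply List.countP_congr
  intro x _
  simp only [Function.comp_apply, slice1_beq_eq x c]

theorem count_operations_spec : Claim_equal_count_operations := by
  intro s _
  unfold Spec_count_operations count_operations count_operations_alt
  simp only [nested_eq_flat, inner_foldl, PySem.List.count_eq]
  have hF := count_eq_countP s 'F'
  have hB := count_eq_countP s 'B'
  simp only [show String.ofList ['F'] = "F" from rfl, show String.ofList ['B'] = "B" from rfl] at hF hB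
  rw [← hF, ← hB]
  simp
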